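-- pv_equiv track=rewrite | github.com/firm-fcc/ZhengDa | scripts/comment/kano_sem_comment_pipeline.py | match_dimensions
-- ===== SOURCE A (Python) =====
-- def match_dimensions(text: str, dimension_keywords: dict[str, list[str]]) -> list[str]:
--     low_text = text.lower()
--     tags: list[str] = []
--     for dim, keywords in dimension_keywords.items():
--         for keyword in keywords:
--             term = str(keyword).strip()
--             if term and term.lower() in low_text:
--                 tags.append(dim)
--                 break
--     return tags
-- ===== SOURCE B (Python) =====
-- def match_dimensions(text: str, dimension_keywords: dict[str, list[str]]) -> list[str]:
--     low_text = text.lower()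
--     n = len(low_text)
--     # stage 1: the distinct non-empty stripped+lowered terms over ALL dimensions
--     terms: set[str] = set()
--     for keywords in dimension_keywords.values():
--         for keyword in keywords:
--             t = str(keyword).strip().lower()
--             if t:
--                 terms.add(t)
--     lengths = {len(t) for t in terms}
--     # stage 2: one sweep over the TEXT positions, hashing each candidate window
--     # into the term set (text-driven multi-pattern search instead of one
--     # substring scan per keyword)
--     found: set[str] = set()
--     for i in range(n):
--         for L in lengths:
--             if i + L <= n:
--                 seg = low_text[i:i + L]
--                 if seg in terms:
--                     found.add(seg)
--     # stage 3: emit dimensions in order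
--     return [dim for dim, keywords in dimension_keywords.items()
--             if any(str(keyword).strip().lower() in found for keyword in keywords)]
-- ===== Notes on version B (the rewrite author's own statement) =====
-- stated objective: faster
-- what changed: B replaces A's per-keyword substring scans by a staged text-driven multi-pattern search: it collects the distinct stripped+lowered terms into a hash set, sweeps the text once over all start positions probing each candidate window (one per distinct term length) against that set, and then emits the dimensions whose terms were found.
import Mathlib
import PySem

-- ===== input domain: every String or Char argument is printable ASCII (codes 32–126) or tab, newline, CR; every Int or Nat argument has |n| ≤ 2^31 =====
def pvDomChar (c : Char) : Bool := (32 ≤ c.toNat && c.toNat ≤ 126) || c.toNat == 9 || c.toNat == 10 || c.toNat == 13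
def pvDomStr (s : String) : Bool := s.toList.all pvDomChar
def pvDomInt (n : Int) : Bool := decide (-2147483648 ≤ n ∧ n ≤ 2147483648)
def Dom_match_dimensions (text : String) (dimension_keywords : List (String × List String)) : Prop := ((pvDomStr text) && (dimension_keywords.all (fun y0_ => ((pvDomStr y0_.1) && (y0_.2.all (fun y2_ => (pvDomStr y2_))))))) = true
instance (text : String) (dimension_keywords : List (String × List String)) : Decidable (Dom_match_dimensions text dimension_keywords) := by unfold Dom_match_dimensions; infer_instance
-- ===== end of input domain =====

-- B replaces A's per-keyword substring scans by a staged text-driven multi-pattern search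
-- (term set, one sweep over text positions probing candidate windows, then emit dims);
-- same return value.

-- ===== PORT A =====
-- inner 'for keyword in keywords: … break' loop of A
def mdScanA (low_text dim : String) (tags : List String) : List String → List String
  | [] => tags
  | kw :: rest =>
    let term := PySem.Str.strip kw
    if term ≠ "" ∧ PySem.Str.isIn (PySem.Str.lower term) low_text then tags ++ [dim]
    else mdScanA low_text dim tags rest

def match_dimensions (text : String) (dimension_keywords : List (String × List String)) : List String :=
  let low_text := PySem.Str.lower text
  dimension_keywords.foldl (fun tags p => mdScanA low_text p.1 tags p.2) []

-- ===== PORT B =====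
-- stage 1: the distinct non-empty stripped+lowered terms over all dimensions
def mdTermsB (dimension_keywords : List (String × List String)) : PySem.Set String :=
  dimension_keywords.foldl (fun terms p =>
    p.2.foldl (fun terms keyword =>
      let t := PySem.Str.lower (PySem.Str.strip keyword)
      if t ≠ "" then PySem.Set.add terms t else terms) terms) PySem.Set.empty

-- stage 2: one sweep over the text positions, probing each candidate window against the term set
def mdFoundB (low_text : String) (n : Int) (lengths : PySem.Set Int) (terms : PySem.Set String) :
    PySem.Set String :=
  (PySem.List.pyRange 0 n 1).foldl (fun found i =>
    lengths.foldl (fun found L =>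
      if i + L ≤ n then
        let seg := PySem.Str.slice low_text (some i) (some (i + L))
        if PySem.Set.contains terms seg then PySem.Set.add found seg else found
      else found) found) PySem.Set.empty

def match_dimensions_alt (text : String) (dimension_keywords : List (String × List String)) : List String :=
  let low_text := PySem.Str.lower text
  let n : Int := PySem.Str.len low_text
  let terms := mdTermsB dimension_keywords
  let lengths : PySem.Set Int := PySem.Set.ofList (terms.map (fun t => (PySem.Str.len t : Int)))
  let found := mdFoundB low_text n lengths terms
  -- stage 3: emit dimensions in order
  (dimension_keywords.filter (fun p =>
      p.2.any (fun keyword =>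
        PySem.Set.contains found (PySem.Str.lower (PySem.Str.strip keyword))))).map (·.1)

-- ===== PRECONDITION & SPEC =====
def Spec_match_dimensions (text : String) (dimension_keywords : List (String × List String)) (out : List String) : Prop := out = match_dimensions_alt text dimension_keywords
instance (text : String) (dimension_keywords : List (String × List String)) (out : List String) : Decidable (Spec_match_dimensions text dimension_keywords out) := by unfold Spec_match_dimensions; infer_instance

-- ===== CLAIM (what is proved, stated in full; the proofs are below) =====
def Claim_equal_match_dimensions : Prop := ∀ (text : String) (dimension_keywords : List (String × List String)), Dom_match_dimensions text dimension_keywords → Spec_match_dimensions text dimension_keywords (match_dimensions text dimension_keywords)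

-- ===== LEMMAS AND PROOFS =====

-- the per-keyword test A performs, as a Bool
def mdChk (low_text kw : String) : Bool :=
  decide (PySem.Str.strip kw ≠ "" ∧ PySem.Str.isIn (PySem.Str.lower (PySem.Str.strip kw)) low_text = true)

theorem lower_eq_empty (s : String) (h : PySem.Str.lower s = "") : s = "" := by
  rw [← String.toList_inj] at h ⊢
  simp [PySem.Str.toList_lower, PySem.Chars.lower] at h
  simpa using h

-- A's inner loop returns tags ++ [dim] iff some keyword passes the test
theorem mdScanA_eq (low_text dim : String) (tags : List String) (kws : List String) :
    mdScanA low_text dim tags kws = if kws.any (mdChk low_text) then tags ++ [dim] else tags := by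
  induction kws with
  | nil => rfl
  | cons kw rest ih =>
    simp only [mdScanA, List.any_cons]
    by_cases h : PySem.Str.strip kw ≠ "" ∧ PySem.Str.isIn (PySem.Str.lower (PySem.Str.strip kw)) low_text = true
    · rw [if_pos h]
      have : mdChk low_text kw = true := decide_eq_true h
      simp [this]
    · rw [if_neg h]
      have : mdChk low_text kw = false := by
        simp only [mdChk, decide_eq_false_iff_not]; exact h
      simp [this, ih]

-- A's outer fold is a filtered map
theorem mdFoldA_eq (low_text : String) (l : List (String × List String)) (acc : List String) :
    l.foldl (fun tags p => mdScanA low_text p.1 tags p.2) acc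
      = acc ++ (l.filter (fun p => p.2.any (mdChk low_text))).map (·.1) := by
  have hstep : (fun (tags : List String) (p : String × List String) => mdScanA low_text p.1 tags p.2)
      = (fun tags p => if p.2.any (mdChk low_text) then tags ++ [p.1] else tags) := by
    funext tags p; exact mdScanA_eq low_text p.1 tags p.2
  rw [hstep]
  induction l generalizing acc with
  | nil => simp
  | cons p t ih =>
    simp only [List.foldl_cons, List.filter_cons]
    by_cases h : p.2.any (mdChk low_text) = true
    · rw [if_pos h, if_pos h, ih]; simp
    · rw [if_neg h, if_neg h, ih]

-- generic: membership after a conditional Set.add fold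
theorem mem_foldl_addIf {α β : Type} [DecidableEq α] (f : β → α) (c : β → Prop) [DecidablePred c]
    (l : List β) (s0 : PySem.Set α) (y : α) :
    y ∈ l.foldl (fun s x => if c x then PySem.Set.add s (f x) else s) s0
      ↔ y ∈ s0 ∨ ∃ x ∈ l, c x ∧ f x = y := by
  induction l generalizing s0 with
  | nil => simp
  | cons x t ih =>
    simp only [List.foldl_cons]
    by_cases h : c x
    · rw [if_pos h, ih]
      simp only [PySem.Set.mem_add, List.mem_cons]
      constructor
      · rintro (⟨hy | hy⟩ | ⟨z, hz, hcz, hfz⟩)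
        · exact Or.inl hy
        · exact Or.inr ⟨x, Or.inl rfl, h, hy.symm⟩
        · exact Or.inr ⟨z, Or.inr hz, hcz, hfz⟩
      · rintro (hy | ⟨z, (rfl | hz), hcz, hfz⟩)
        · exact Or.inl (Or.inl hy)
        · exact Or.inl (Or.inr hfz.symm)
        · exact Or.inr ⟨z, hz, hcz, hfz⟩
    · rw [if_neg h, ih]
      simp only [List.mem_cons]
      constructor
      · rintro (hy | ⟨z, hz, hcz, hfz⟩)
        · exact Or.inl hy
        · exact Or.inr ⟨z, Or.inr hz, hcz, hfz⟩
      · rintro (hy | ⟨z, (rfl | hz), hcz, hfz⟩)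
        · exact Or.inl hy
        · exact absurd hcz h
        · exact Or.inr ⟨z, hz, hcz, hfz⟩

-- membership in the term set
theorem mem_mdTermsB_inner (y : String) (kws : List String) (s0 : PySem.Set String) :
    y ∈ kws.foldl (fun terms keyword =>
          let t := PySem.Str.lower (PySem.Str.strip keyword)
          if t ≠ "" then PySem.Set.add terms t else terms) s0
      ↔ y ∈ s0 ∨ ∃ kw ∈ kws,
          PySem.Str.lower (PySem.Str.strip kw) = y ∧ PySem.Str.lower (PySem.Str.strip kw) ≠ "" := by
  have := mem_foldl_addIf (fun kw => PySem.Str.lower (PySem.Str.strip kw))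
    (fun kw => PySem.Str.lower (PySem.Str.strip kw) ≠ "") kws s0 y
  simp only [] at this
  rw [this]
  constructor
  · rintro (h | ⟨z, hz, hc, hf⟩)
    · exact Or.inl h
    · exact Or.inr ⟨z, hz, hf, hc⟩
  · rintro (h | ⟨z, hz, hf, hc⟩)
    · exact Or.inl h
    · exact Or.inr ⟨z, hz, hc, hf⟩

theorem mem_mdTermsB_gen (y : String) (dk : List (String × List String)) (s0 : PySem.Set String) :
    y ∈ dk.foldl (fun terms p =>
          p.2.foldl (fun terms keyword =>
            let t := PySem.Str.lower (PySem.Str.strip keyword)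
            if t ≠ "" then PySem.Set.add terms t else terms) terms) s0
      ↔ y ∈ s0 ∨ ∃ p ∈ dk, ∃ kw ∈ p.2,
          PySem.Str.lower (PySem.Str.strip kw) = y ∧ PySem.Str.lower (PySem.Str.strip kw) ≠ "" := by
  induction dk generalizing s0 with
  | nil => simp
  | cons q r ihr =>
    simp only [List.foldl_cons]
    rw [ihr, mem_mdTermsB_inner]
    simp only [List.mem_cons]
    constructor
    · rintro ((h | ⟨kw, hkw, h1, h2⟩) | ⟨z, hz, hrest⟩)
      · exact Or.inl h
      · exact Or.inr ⟨q, Or.inl rfl, kw, hkw, h1, h2⟩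
      · exact Or.inr ⟨z, Or.inr hz, hrest⟩
    · rintro (h | ⟨z, (rfl | hz), hrest⟩)
      · exact Or.inl (Or.inl h)
      · exact Or.inl (Or.inr hrest)
      · exact Or.inr ⟨z, hz, hrest⟩

theorem mem_mdTermsB (dk : List (String × List String)) (y : String) :
    y ∈ mdTermsB dk
      ↔ ∃ p ∈ dk, ∃ kw ∈ p.2,
          PySem.Str.lower (PySem.Str.strip kw) = y ∧ PySem.Str.lower (PySem.Str.strip kw) ≠ "" := by
  unfold mdTermsB
  rw [mem_mdTermsB_gen]
  simp [PySem.Set.empty]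

-- membership in the found set
theorem mem_mdFoundB_inner (low_text : String) (n i : Int) (terms : PySem.Set String)
    (y : String) (ls : List Int) (s0 : PySem.Set String) :
    y ∈ ls.foldl (fun found L =>
          if i + L ≤ n then
            let seg := PySem.Str.slice low_text (some i) (some (i + L))
            if PySem.Set.contains terms seg then PySem.Set.add found seg else found
          else found) s0
      ↔ y ∈ s0 ∨ ∃ L ∈ ls,
          i + L ≤ n ∧ PySem.Set.contains terms (PySem.Str.slice low_text (some i) (some (i + L))) = true
            ∧ PySem.Str.slice low_text (some i) (some (i + L)) = y := by
  induction ls generalizing s0 with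
  | nil => simp
  | cons L r ihr =>
    simp only [List.foldl_cons]
    by_cases h1 : i + L ≤ n
    · rw [if_pos h1]
      by_cases h2 : PySem.Set.contains terms (PySem.Str.slice low_text (some i) (some (i + L))) = true
      · simp only [h2, if_pos]
        rw [ihr]
        simp only [PySem.Set.mem_add, List.mem_cons]
        constructor
        · rintro (⟨h | h⟩ | ⟨z, hz, hrest⟩)
          · exact Or.inl h
          · exact Or.inr ⟨L, Or.inl rfl, h1, h2, h.symm⟩
          · exact Or.inr ⟨z, Or.inr hz, hrest⟩
        · rintro (h | ⟨z, (rfl | hz), ha, hb, hc⟩)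
          · exact Or.inl (Or.inl h)
          · exact Or.inl (Or.inr hc.symm)
          · exact Or.inr ⟨z, hz, ha, hb, hc⟩
      · simp only [h2]
        rw [if_neg (by simpa using h2), ihr]
        simp only [List.mem_cons]
        constructor
        · rintro (h | ⟨z, hz, hrest⟩)
          · exact Or.inl h
          · exact Or.inr ⟨z, Or.inr hz, hrest⟩
        · rintro (h | ⟨z, (rfl | hz), ha, hb, hc⟩)
          · exact Or.inl h
          · exact absurd hb h2
          · exact Or.inr ⟨z, hz, ha, hb, hc⟩
    · rw [if_neg h1, ihr]
      simp only [List.mem_cons]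
      constructor
      · rintro (h | ⟨z, hz, hrest⟩)
        · exact Or.inl h
        · exact Or.inr ⟨z, Or.inr hz, hrest⟩
      · rintro (h | ⟨z, (rfl | hz), ha, hb, hc⟩)
        · exact Or.inl h
        · exact absurd ha h1
        · exact Or.inr ⟨z, hz, ha, hb, hc⟩

theorem mem_mdFoundB (low_text : String) (n : Int) (lengths : PySem.Set Int)
    (terms : PySem.Set String) (y : String) :
    y ∈ mdFoundB low_text n lengths terms
      ↔ ∃ i ∈ PySem.List.pyRange 0 n 1, ∃ L ∈ (lengths : List Int),
          i + L ≤ n ∧ PySem.Set.contains terms (PySem.Str.slice low_text (some i) (some (i + L))) = true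
            ∧ PySem.Str.slice low_text (some i) (some (i + L)) = y := by
  unfold mdFoundB
  have gen : ∀ (rs : List Int) (s0 : PySem.Set String),
      y ∈ rs.foldl (fun found i =>
          (lengths : List Int).foldl (fun found L =>
            if i + L ≤ n then
              let seg := PySem.Str.slice low_text (some i) (some (i + L))
              if PySem.Set.contains terms seg then PySem.Set.add found seg else found
            else found) found) s0
        ↔ y ∈ s0 ∨ ∃ i ∈ rs, ∃ L ∈ (lengths : List Int),
            i + L ≤ n ∧ PySem.Set.contains terms (PySem.Str.slice low_text (some i) (some (i + L))) = true
              ∧ PySem.Str.slice low_text (some i) (some (i + L)) = y := by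
    intro rs
    induction rs with
    | nil => simp
    | cons i r ihr =>
      intro s0
      simp only [List.foldl_cons]
      rw [ihr, mem_mdFoundB_inner]
      simp only [List.mem_cons]
      constructor
      · rintro ((h | ⟨L, hL, hrest⟩) | ⟨z, hz, hrest⟩)
        · exact Or.inl h
        · exact Or.inr ⟨i, Or.inl rfl, L, hL, hrest⟩
        · exact Or.inr ⟨z, Or.inr hz, hrest⟩
      · rintro (h | ⟨z, (rfl | hz), hrest⟩)
        · exact Or.inl (Or.inl h)
        · exact Or.inl (Or.inr hrest)
        · exact Or.inr ⟨z, hz, hrest⟩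
  rw [gen]
  simp [PySem.Set.empty]

-- characterization of the found set: exactly the terms that occur in the text
theorem mem_found_iff (low_text : String) (dk : List (String × List String)) (t : String) :
    t ∈ mdFoundB low_text (PySem.Str.len low_text)
          (PySem.Set.ofList ((mdTermsB dk).map (fun u => (PySem.Str.len u : Int)))) (mdTermsB dk)
      ↔ t ∈ mdTermsB dk ∧ PySem.Str.isIn t low_text = true := by
  rw [mem_mdFoundB]
  constructor
  · rintro ⟨i, hi, L, hL, h1, h2, h3⟩
    have hmemt : t ∈ mdTermsB dk := by
      rw [← h3]; exact (PySem.Set.contains_iff _ _).mp h2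
    refine ⟨hmemt, ?_⟩
    have hi' := (PySem.List.mem_pyRange_one).mp hi
    have hL0 : 0 ≤ L := by
      have := (PySem.Set.mem_ofList _ _).mp hL
      obtain ⟨u, _, hu⟩ := List.mem_map.mp this
      have hlen : PySem.Str.len u = (u.toList.length : Int) := by simp
      omega
    -- the slice is a take of a drop, hence a prefix of a drop
    have hslice : (PySem.Str.slice low_text (some i) (some (i + L))).toList
        = (low_text.toList.drop i.toNat).take ((i + L).toNat - i.toNat) := by
      simp only [PySem.Str.toList_slice, PySem.Chars.slice_eq_listSlice]
      exact PySem.List.slice_toNat _ hi'.1 (by omega)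
    have hpre : t.toList <+: low_text.toList.drop i.toNat := by
      rw [← h3, hslice]; exact List.take_prefix _ _
    have := (PySem.Chars.exists_prefix_drop_iff_isIn _ _).mp ⟨_, hpre⟩
    simp
    exact this
  · rintro ⟨hmemt, hisin⟩
    have hne : t ≠ "" := by
      obtain ⟨p, _, kw, _, h1, h2⟩ := (mem_mdTermsB dk t).mp hmemt
      rw [← h1]; exact h2
    have hisin' : PySem.Chars.isIn t.toList low_text.toList = true := by simpa using hisin
    obtain ⟨j, hpre⟩ := (PySem.Chars.exists_prefix_drop_iff_isIn _ _).mpr hisin'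
    have htlen : 1 ≤ t.toList.length := by
      cases h : t.toList with
      | nil => exact absurd (by rw [← String.toList_inj, h]; rfl) hne
      | cons a r => simp [h]
    have hjlt : j < low_text.toList.length := by
      have h1 := hpre.length_le
      simp only [List.length_drop] at h1
      omega
    have hsl : PySem.Str.slice low_text (some (j : Int)) (some ((j : Int) + (t.toList.length : Int))) = t := by
      rw [← String.toList_inj]
      simp only [PySem.Str.toList_slice, PySem.Chars.slice_eq_listSlice]
      rw [PySem.List.slice_natCast_add]
      exact (List.prefix_iff_eq_take.mp hpre).symm
    refine ⟨(j : Int), ?_, (t.toList.length : Int), ?_, ?_, ?_, hsl⟩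
    · rw [PySem.List.mem_pyRange_one]
      constructor
      · positivity
      · simp only [PySem.Str.len_eq, PySem.Chars.len_eq]; exact_mod_cast hjlt
    · rw [PySem.Set.mem_ofList _ _]
      refine List.mem_map.mpr ⟨t, hmemt, ?_⟩
      simp
    · have h1 := hpre.length_le
      simp only [List.length_drop, PySem.Str.len_eq, PySem.Chars.len_eq] at *
      omega
    · rw [hsl]
      exact (PySem.Set.contains_iff _ _).mpr hmemt

-- B's per-keyword membership test agrees with A's per-keyword test
theorem bPred_eq_mdChk (low_text : String) (dk : List (String × List String))
    (p : String × List String) (hp : p ∈ dk) (kw : String) (hkw : kw ∈ p.2) :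
    PySem.Set.contains
        (mdFoundB low_text (PySem.Str.len low_text)
          (PySem.Set.ofList ((mdTermsB dk).map (fun u => (PySem.Str.len u : Int)))) (mdTermsB dk))
        (PySem.Str.lower (PySem.Str.strip kw))
      = mdChk low_text kw := by
  by_cases hterm : PySem.Str.strip kw = ""
  · have hlow : PySem.Str.lower (PySem.Str.strip kw) = "" := by rw [hterm]; rfl
    rw [hlow]
    have hnot : "" ∉ mdFoundB low_text (PySem.Str.len low_text)
        (PySem.Set.ofList ((mdTermsB dk).map (fun u => (PySem.Str.len u : Int)))) (mdTermsB dk) := by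
      intro h
      obtain ⟨hmem, _⟩ := (mem_found_iff low_text dk "").mp h
      obtain ⟨q, _, kw', _, h1, h2⟩ := (mem_mdTermsB dk "").mp hmem
      exact h2 h1
    have hchk : mdChk low_text kw = false := by
      simp only [mdChk, decide_eq_false_iff_not]
      intro h; exact h.1 hterm
    rw [hchk]
    simp only [PySem.Set.contains_eq_listContains]
    exact (Bool.not_eq_true _).mp (fun h => hnot (by simpa using h))
  · have hlowne : PySem.Str.lower (PySem.Str.strip kw) ≠ "" := by
      intro h; exact hterm (lower_eq_empty _ h)
    have hmemt : PySem.Str.lower (PySem.Str.strip kw) ∈ mdTermsB dk :=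
      (mem_mdTermsB dk _).mpr ⟨p, hp, kw, hkw, rfl, hlowne⟩
    by_cases hin : PySem.Str.isIn (PySem.Str.lower (PySem.Str.strip kw)) low_text = true
    · have : PySem.Str.lower (PySem.Str.strip kw) ∈ mdFoundB low_text (PySem.Str.len low_text)
          (PySem.Set.ofList ((mdTermsB dk).map (fun u => (PySem.Str.len u : Int)))) (mdTermsB dk) :=
        (mem_found_iff low_text dk _).mpr ⟨hmemt, hin⟩
      rw [(PySem.Set.contains_iff _ _).mpr this]
      have : mdChk low_text kw = true := by
        simp only [mdChk, decide_eq_true_eq]; exact ⟨hterm, hin⟩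
      rw [this]
    · have hnot : PySem.Str.lower (PySem.Str.strip kw) ∉ mdFoundB low_text (PySem.Str.len low_text)
          (PySem.Set.ofList ((mdTermsB dk).map (fun u => (PySem.Str.len u : Int)))) (mdTermsB dk) := by
        intro h; exact hin ((mem_found_iff low_text dk _).mp h).2
      have hchk : mdChk low_text kw = false := by
        simp only [mdChk, decide_eq_false_iff_not]
        intro h; exact hin h.2
      rw [hchk]
      simp only [PySem.Set.contains_eq_listContains]
      exact (Bool.not_eq_true _).mp (fun h => hnot (by simpa using h))

theorem any_congr_mem {α : Type} (l : List α) (p q : α → Bool) (h : ∀ x ∈ l, p x = q x) :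
    l.any p = l.any q := by
  induction l with
  | nil => rfl
  | cons a t ih =>
    simp only [List.any_cons, h a List.mem_cons_self,
      ih (fun x hx => h x (List.mem_cons_of_mem _ hx))]

-- ===== VERDICT (by name: the statement is the Claim_ definition above) =====
set_option maxHeartbeats 1000000 in
theorem match_dimensions_spec : Claim_equal_match_dimensions := by
  intro text dk _
  unfold Spec_match_dimensions match_dimensions match_dimensions_alt
  rw [mdFoldA_eq]
  simp only [List.nil_append]
  congr 1
  apply List.filter_congr
  intro p hp
  exact any_congr_mem _ _ _ (fun kw hkw => (bPred_eq_mdChk (PySem.Str.lower text) dk p hp kw hkw).symm)
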